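-- pv_equiv track=rewrite | github.com/NoelKi/satlink-threatguard | src/library.py | find_matching_true_periods
-- ===== SOURCE A (Python) =====
-- def find_matching_true_periods(list_a:list, list_b:list, intervals:list[tuple]):
--     """
--     This function determines if both lists a and b have the same indexes for
--     True values for all periods given in the list intervals.
--
--     :param list_a: list A
--     :type list_a: list
--     :param list_b: list B
--     :type list_b: list
--     :param intervals: los periods
--     :type intervals: list
--     :return matching_periods: list of tuples of matching periods with their index in the intervals list and amount of time steps
--     """
--     matching_periods = []
--
--     for index, (start, end) in enumerate(intervals):
--         counter = 0
--         for i in range(start, end):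
--             if list_a[i] == True and list_b[i] == True:
--                 counter += 1
--
--         if counter > 0:
--             matching_periods.append((index, counter))
--
--     return matching_periods
-- ===== SOURCE B (Python) =====
-- def find_matching_true_periods(list_a, list_b, intervals):
--     prefix = [0]
--     for a, b in zip(list_a, list_b):
--         prefix.append(prefix[-1] + (1 if a == True and b == True else 0))
--     matching_periods = []
--     for index, (start, end) in enumerate(intervals):
--         if start < end:
--             counter = prefix[end] - prefix[start]
--             if counter > 0:
--                 matching_periods.append((index, counter))
--     return matching_periods
-- ===== Notes on version B (the rewrite author's own statement) =====
-- stated objective: alternative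
-- what changed: Replaces the per-interval rescan of both lists by a single prefix-sum pass over the both-true flags, answering each interval by one subtraction.
-- outside the precondition, e.g. on find_matching_true_periods([True, True], [True, True], [(-1, 1)]): A returns [(0, 2)], B returns []; on find_matching_true_periods([True], [True], [(0, 5)]): A raises IndexError, B raises IndexError
import Mathlib
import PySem

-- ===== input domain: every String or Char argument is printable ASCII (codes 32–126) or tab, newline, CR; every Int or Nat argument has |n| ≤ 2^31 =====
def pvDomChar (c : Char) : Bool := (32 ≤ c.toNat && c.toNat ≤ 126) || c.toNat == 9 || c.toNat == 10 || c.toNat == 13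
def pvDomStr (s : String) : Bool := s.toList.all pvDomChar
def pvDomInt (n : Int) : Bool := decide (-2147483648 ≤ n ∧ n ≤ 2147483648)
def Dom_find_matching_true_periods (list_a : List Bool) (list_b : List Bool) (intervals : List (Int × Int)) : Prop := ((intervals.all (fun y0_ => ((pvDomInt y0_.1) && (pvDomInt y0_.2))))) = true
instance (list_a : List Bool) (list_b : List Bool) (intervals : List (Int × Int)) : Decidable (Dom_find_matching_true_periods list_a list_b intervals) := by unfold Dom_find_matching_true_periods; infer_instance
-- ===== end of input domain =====

-- B replaces A's per-interval rescan of both lists by one prefix-sum pass over the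
-- both-true flags, answering each interval with a single subtraction (alternative algorithm).


-- ===== PORT A =====
def find_matching_true_periods (list_a : List Bool) (list_b : List Bool) (intervals : List (Int × Int)) : List (Int × Int) :=
  (PySem.List.enumerate intervals).foldl (fun matching_periods p =>
    let counter : Int :=
      (PySem.List.pyRange p.2.1 p.2.2).foldl (fun counter i =>
        if PySem.List.pyGetD list_a i false = true ∧ PySem.List.pyGetD list_b i false = true then
          counter + 1
        else counter) 0
    if counter > 0 then matching_periods ++ [(p.1, counter)] else matching_periods) []

-- ===== PORT B =====
def find_matching_true_periods_alt (list_a : List Bool) (list_b : List Bool) (intervals : List (Int × Int)) : List (Int × Int) :=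
  let prefixSums : List Int :=
    (list_a.zip list_b).foldl (fun pre z =>
      pre ++ [PySem.List.pyGetD pre (-1) 0 + (if z.1 = true ∧ z.2 = true then 1 else 0)]) [0]
  (PySem.List.enumerate intervals).foldl (fun matching_periods p =>
    if p.2.1 < p.2.2 then
      if (PySem.List.pyGetD prefixSums p.2.2 0 - PySem.List.pyGetD prefixSums p.2.1 0) > 0 then
        matching_periods ++ [(p.1, PySem.List.pyGetD prefixSums p.2.2 0 - PySem.List.pyGetD prefixSums p.2.1 0)]
      else matching_periods
    else matching_periods) []

-- ===== PRECONDITION & SPEC =====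
-- Pre_ excludes intervals whose range reaches an index out of range of either list (A raises
-- IndexError there) or a negative index, where A's value comes from Python's negative-index
-- wraparound — an artefact of A's implementation, not a sensible reading of a time interval.
def Pre_find_matching_true_periods (list_a : List Bool) (list_b : List Bool) (intervals : List (Int × Int)) : Prop :=
  ∀ p ∈ intervals, p.1 < p.2 → 0 ≤ p.1 ∧ p.2 ≤ (min list_a.length list_b.length : Int)
instance (list_a : List Bool) (list_b : List Bool) (intervals : List (Int × Int)) : Decidable (Pre_find_matching_true_periods list_a list_b intervals) := by unfold Pre_find_matching_true_periods; infer_instance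

def pvWitness_find_matching_true_periods : List Bool × List Bool × (List (Int × Int)) :=
  ([true, true, false], [true, false, true], [(0, 2), (2, 1), (1, 3)])

def Spec_find_matching_true_periods (list_a : List Bool) (list_b : List Bool) (intervals : List (Int × Int)) (out : List (Int × Int)) : Prop := out = find_matching_true_periods_alt list_a list_b intervals
instance (list_a : List Bool) (list_b : List Bool) (intervals : List (Int × Int)) (out : List (Int × Int)) : Decidable (Spec_find_matching_true_periods list_a list_b intervals out) := by unfold Spec_find_matching_true_periods; infer_instance

-- ===== CLAIM (what is proved, stated in full; the proofs are below) =====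
def Claim_equal_find_matching_true_periods : Prop := ∀ (list_a : List Bool) (list_b : List Bool) (intervals : List (Int × Int)), Dom_find_matching_true_periods list_a list_b intervals → Pre_find_matching_true_periods list_a list_b intervals → Spec_find_matching_true_periods list_a list_b intervals (find_matching_true_periods list_a list_b intervals)

-- ===== LEMMAS AND PROOFS =====

-- number of both-true positions among the first k entries of the zipped lists
def pvCnt (zs : List (Bool × Bool)) (k : Nat) : Int :=
  ((zs.take k).countP (fun z => z.1 && z.2) : Nat)

-- A's inner loop over one interval, named so rewrites stay robust
def pvCounter (list_a list_b : List Bool) (s e : Int) : Int :=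
  (PySem.List.pyRange s e).foldl (fun counter i =>
    if PySem.List.pyGetD list_a i false = true ∧ PySem.List.pyGetD list_b i false = true then
      counter + 1
    else counter) 0

-- the value of B's prefix-sum list, position by position
def pvPrefix (list_a list_b : List Bool) : List Int :=
  (List.range ((list_a.zip list_b).length + 1)).map (fun k => pvCnt (list_a.zip list_b) k)

lemma pvCnt_succ (zs : List (Bool × Bool)) (k : Nat) (hk : k < zs.length) :
    pvCnt zs (k + 1) = pvCnt zs k + (if (zs[k].1 = true ∧ zs[k].2 = true) then 1 else 0) := by
  unfold pvCnt
  rw [List.take_add_one, List.countP_append]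
  simp only [List.getElem?_eq_getElem hk]
  by_cases h : zs[k].1 = true ∧ zs[k].2 = true
  · simp [h.1, h.2]
  · have hb : (zs[k].1 && zs[k].2) = false := by
      rcases Bool.eq_false_or_eq_true zs[k].1 with h1 | h1 <;>
        rcases Bool.eq_false_or_eq_true zs[k].2 with h2 | h2 <;> simp_all
    simp [hb, h]

-- B's fold really builds the prefix-sum table pvPrefix
lemma prefix_eq (zs : List (Bool × Bool)) :
    zs.foldl (fun pre z =>
      pre ++ [PySem.List.pyGetD pre (-1) 0 + (if z.1 = true ∧ z.2 = true then 1 else 0)]) [0]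
    = (List.range (zs.length + 1)).map (fun k => pvCnt zs k) := by
  induction zs using List.reverseRecOn with
  | nil => simp [pvCnt]
  | append_singleton zs x ih =>
    rw [List.foldl_append, ih]
    have hlast : PySem.List.pyGetD ((List.range (zs.length + 1)).map (fun k => pvCnt zs k)) (-1) 0
        = pvCnt zs zs.length := by
      simp [PySem.List.pyGetD, PySem.List.pyGet?_neg_one, List.getLast?_eq_getElem?]
    have htake : ∀ k ≤ zs.length, pvCnt (zs ++ [x]) k = pvCnt zs k := by
      intro k hk
      unfold pvCnt
      rw [List.take_append_of_le_length hk]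
    have hfull : pvCnt (zs ++ [x]) (zs.length + 1)
        = pvCnt zs zs.length + (if x.1 = true ∧ x.2 = true then 1 else 0) := by
      unfold pvCnt
      rw [List.take_of_length_le (by simp), List.countP_append, List.take_of_length_le (le_refl _)]
      by_cases h : x.1 = true ∧ x.2 = true
      · simp [h.1, h.2]
      · have hb : (x.1 && x.2) = false := by
          rcases Bool.eq_false_or_eq_true x.1 with h1 | h1 <;>
            rcases Bool.eq_false_or_eq_true x.2 with h2 | h2 <;> simp_all
        simp [hb, h]
    simp only [List.foldl_cons, List.foldl_nil, List.length_append, List.length_singleton]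
    rw [List.range_succ (n := zs.length + 1), List.map_append, hlast]
    congr 1
    · apply List.map_congr_left
      intro k hk
      exact (htake k (by simpa using Nat.lt_succ_iff.mp (List.mem_range.mp hk))).symm
    · simp [hfull]

-- A's inner loop counts exactly the prefix-sum difference
lemma counter_eq (list_a list_b : List Bool) (s : Int) (n : Nat) (hs : 0 ≤ s)
    (hle : s + n ≤ ((list_a.zip list_b).length : Int)) :
    pvCounter list_a list_b s (s + n)
    = pvCnt (list_a.zip list_b) (s + n).toNat - pvCnt (list_a.zip list_b) s.toNat := by
  induction n with
  | zero =>
    simp [pvCounter, PySem.List.pyRange_one_eq_nil (le_refl s)]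
  | succ n ih =>
    have hle' : s + n ≤ ((list_a.zip list_b).length : Int) := by push_cast at hle ⊢; omega
    have hrange : PySem.List.pyRange s (s + (n + 1 : Nat)) = PySem.List.pyRange s (s + n) ++ [s + n] := by
      have : (s + (n + 1 : Nat) : Int) = (s + n) + 1 := by push_cast; ring
      rw [this, PySem.List.pyRange_one_succ_right (by omega)]
    unfold pvCounter at ih ⊢
    rw [hrange, List.foldl_append, ih hle']
    set zs := list_a.zip list_b with hzs
    have hk : (s + n).toNat < zs.length := by push_cast at hle; omega
    have hka : (s + n).toNat < list_a.length := by
      rw [hzs] at hk; simp [List.length_zip] at hk; omega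
    have hkb : (s + n).toNat < list_b.length := by
      rw [hzs] at hk; simp [List.length_zip] at hk; omega
    have hga : PySem.List.pyGetD list_a (s + n) false = list_a[(s + n).toNat] := by
      rw [PySem.List.pyGetD_of_nonneg _ _ (by omega)]
      exact List.getD_eq_getElem _ _ hka
    have hgb : PySem.List.pyGetD list_b (s + n) false = list_b[(s + n).toNat] := by
      rw [PySem.List.pyGetD_of_nonneg _ _ (by omega)]
      exact List.getD_eq_getElem _ _ hkb
    have hz : zs[(s + n).toNat] = (list_a[(s + n).toNat], list_b[(s + n).toNat]) := by
      simp [hzs, List.getElem_zip]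
    have htn : (s + (n + 1 : Nat)).toNat = (s + n).toNat + 1 := by omega
    rw [htn, pvCnt_succ zs _ hk, hz]
    simp only [List.foldl_cons, List.foldl_nil, hga, hgb]
    split <;> ring

-- B's table lookup is pvCnt
lemma getD_prefix (list_a list_b : List Bool) (e : Int) (h0 : 0 ≤ e)
    (hle : e ≤ ((list_a.zip list_b).length : Int)) :
    PySem.List.pyGetD (pvPrefix list_a list_b) e 0 = pvCnt (list_a.zip list_b) e.toNat := by
  rw [pvPrefix, PySem.List.pyGetD_of_nonneg _ _ h0]
  exact PySem.List.getD_map_range _ _ _ _ (by omega)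

-- the two enumerate-folds agree interval by interval
lemma outer_fold_eq (list_a list_b : List Bool) (ivs : List (Int × Int))
    (hpre : ∀ p ∈ ivs, p.1 < p.2 → 0 ≤ p.1 ∧ p.2 ≤ ((list_a.zip list_b).length : Int)) :
    ∀ (idx : Int) (acc : List (Int × Int)),
    (PySem.List.enumerate ivs idx).foldl (fun mp p =>
      if pvCounter list_a list_b p.2.1 p.2.2 > 0 then
        mp ++ [(p.1, pvCounter list_a list_b p.2.1 p.2.2)]
      else mp) acc
    = (PySem.List.enumerate ivs idx).foldl (fun mp p =>
      if p.2.1 < p.2.2 then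
        if (PySem.List.pyGetD (pvPrefix list_a list_b) p.2.2 0
            - PySem.List.pyGetD (pvPrefix list_a list_b) p.2.1 0) > 0 then
          mp ++ [(p.1, PySem.List.pyGetD (pvPrefix list_a list_b) p.2.2 0
            - PySem.List.pyGetD (pvPrefix list_a list_b) p.2.1 0)]
        else mp
      else mp) acc := by
  induction ivs with
  | nil => intro idx acc; simp [PySem.List.enumerate]
  | cons p ivs ih =>
    intro idx acc
    have hp := hpre p (List.mem_cons_self ..)
    have hpre' : ∀ q ∈ ivs, q.1 < q.2 → 0 ≤ q.1 ∧ q.2 ≤ ((list_a.zip list_b).length : Int) :=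
      fun q hq => hpre q (List.mem_cons_of_mem _ hq)
    simp only [PySem.List.enumerate_cons, List.foldl_cons]
    by_cases hlt : p.1 < p.2
    · obtain ⟨h0, hle⟩ := hp hlt
      have hn : p.2 = p.1 + ((p.2 - p.1).toNat : Int) := by omega
      have hcnt : pvCounter list_a list_b p.1 p.2
          = pvCnt (list_a.zip list_b) p.2.toNat - pvCnt (list_a.zip list_b) p.1.toNat := by
        rw [hn, counter_eq list_a list_b p.1 _ h0 (by omega), ← hn]
      rw [hcnt, if_pos hlt, getD_prefix _ _ _ (by omega) hle, getD_prefix _ _ _ h0 (by omega)]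
      exact ih hpre' (idx + 1) _
    · have hz : pvCounter list_a list_b p.1 p.2 = 0 := by
        rw [pvCounter, PySem.List.pyRange_one_eq_nil (by omega)]
        rfl
      rw [hz, if_neg hlt, if_neg (by omega)]
      exact ih hpre' (idx + 1) _

-- ===== VERDICT (by name: the statement is the Claim_ definition above) =====
theorem find_matching_true_periods_spec : Claim_equal_find_matching_true_periods := by
  intro list_a list_b intervals _hdom hpre
  have hpre' : ∀ p ∈ intervals, p.1 < p.2 → 0 ≤ p.1 ∧ p.2 ≤ ((list_a.zip list_b).length : Int) := by
    intro p hp hlt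
    have h := hpre p hp hlt
    constructor
    · exact h.1
    · have := h.2
      simp only [List.length_zip]
      push_cast at this ⊢
      omega
  show find_matching_true_periods list_a list_b intervals
      = find_matching_true_periods_alt list_a list_b intervals
  unfold find_matching_true_periods_alt
  rw [prefix_eq]
  exact outer_fold_eq list_a list_b intervals hpre' 0 []
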